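-- pv_equiv track=rewrite | github.com/davearussell/advent2022 | day24/solve.py | identify_safe_cells
-- ===== SOURCE A (Python) =====
-- import math
--
-- def identify_safe_cells(grid, start, goal):
--     width = len(grid[0])
--     height = len(grid)
--     period = math.lcm(width, height)
--     winds = []
--     directions = {'>': (1, 0), '<': (-1, 0), '^': (0, -1), 'v': (0, 1)}
--     all_cells = {(x, y) for x in range(width) for y in range(height)} | {start, goal}
--     safe_cells = []
--     for y, row in enumerate(grid):
--         for x, cell in enumerate(row):
--             if cell in '<>^v':
--                 winds.append([(x, y), directions[cell]])
--
--     for i in range(period):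
--         wind_cells = {pos for pos, _ in winds}
--         safe_cells.append(all_cells - wind_cells)
--         for wind in winds:
--             x, y = wind[0]
--             dx, dy = wind[1]
--             wind[0] = ((x + dx) % width, (y + dy) % height)
--
--     return safe_cells
-- ===== SOURCE B (Python) =====
-- import math
--
-- def identify_safe_cells(grid, start, goal):
--     width = len(grid[0])
--     height = len(grid)
--     period = math.lcm(width, height)
--     directions = {'>': (1, 0), '<': (-1, 0), '^': (0, -1), 'v': (0, 1)}
--     all_cells = {(x, y) for x in range(width) for y in range(height)} | {start, goal}
--     winds = [((x, y), directions[c])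
--              for y, row in enumerate(grid)
--              for x, c in enumerate(row) if c in '<>^v']
--     return [all_cells - {((x + dx * i) % width, (y + dy * i) % height)
--                          for (x, y), (dx, dy) in winds}
--             for i in range(period)]
-- ===== Notes on version B (the rewrite author's own statement) =====
-- stated objective: simpler
-- what changed: B drops A's step-by-step mutation of the wind list: each blizzard's position at step i is computed in closed form as ((x0+dx*i)%width,(y0+dy*i)%height) inside a single list comprehension, so no running wind state is kept between steps.
-- outside the precondition, e.g. on identify_safe_cells(['>', '.>'], (1, 1), (1, 1)): A returns [{(0, 1)}, {(1, 1)}], B returns [{(1, 1)}, {(1, 1)}]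
import Mathlib
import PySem

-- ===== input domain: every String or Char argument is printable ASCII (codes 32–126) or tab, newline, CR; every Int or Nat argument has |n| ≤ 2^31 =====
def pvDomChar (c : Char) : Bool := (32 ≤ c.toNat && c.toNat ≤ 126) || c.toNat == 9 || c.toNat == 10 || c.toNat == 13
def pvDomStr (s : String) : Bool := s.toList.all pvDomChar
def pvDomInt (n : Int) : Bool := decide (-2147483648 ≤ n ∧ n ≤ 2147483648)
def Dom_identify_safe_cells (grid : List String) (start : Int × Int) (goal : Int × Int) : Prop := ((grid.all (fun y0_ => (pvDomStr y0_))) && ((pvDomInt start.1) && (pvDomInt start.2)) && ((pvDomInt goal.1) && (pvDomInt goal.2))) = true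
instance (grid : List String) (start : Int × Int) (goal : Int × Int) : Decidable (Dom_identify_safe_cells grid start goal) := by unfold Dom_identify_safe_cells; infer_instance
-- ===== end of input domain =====

-- B replaces A's step-by-step mutation of the blizzard positions by the closed-form position
-- ((x0+dx*i) % width, (y0+dy*i) % height) at each step i (objective: simpler; same cost).
-- Equivalence is about the RETURN value; neither program mutates its arguments.

-- ===== PORT A =====

-- cell in '<>^v'
def iscIsArrow (c : Char) : Bool := c = '<' || c = '>' || c = '^' || c = 'v'

-- directions[cell]  (total lookup: in both programs it is only applied to arrow characters)
def iscDir (c : Char) : Int × Int :=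
  if c = '>' then (1, 0) else if c = '<' then (-1, 0) else if c = '^' then (0, -1) else (0, 1)

-- {(x, y) for x in range(width) for y in range(height)} | {start, goal}
def iscAllCells (width height : Int) (start goal : Int × Int) : PySem.Set (Int × Int) :=
  PySem.Set.union
    (PySem.Set.ofList ((PySem.List.pyRange 0 width 1).flatMap
      (fun x => (PySem.List.pyRange 0 height 1).map (fun y => (x, y)))))
    (PySem.Set.ofList [start, goal])

-- wind[0] = ((x + dx) % width, (y + dy) % height)
def iscStep (width height : Int) (w : (Int × Int) × (Int × Int)) : (Int × Int) × (Int × Int) :=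
  ((PySem.Int.mod (w.1.1 + w.2.1) width, PySem.Int.mod (w.1.2 + w.2.2) height), w.2)

-- "for i in range(period): …" — the loop body never reads i, so it is a count-down recursion
def iscLoopA (width height : Int) (all_cells : PySem.Set (Int × Int))
    (winds : List ((Int × Int) × (Int × Int))) (safe : List (List (Int × Int))) :
    Nat → List (List (Int × Int))
  | 0 => safe
  | n + 1 =>
    iscLoopA width height all_cells (winds.map (iscStep width height))
      (safe ++ [PySem.Set.diff all_cells (PySem.Set.ofList (winds.map (·.1)))]) n

def identify_safe_cells (grid : List String) (start : Int × Int) (goal : Int × Int) : List (List (Int × Int)) :=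
  match grid with
  | [] => []  -- Python raises IndexError on grid[0]; excluded by Pre_
  | row0 :: _ =>
    let width : Int := PySem.Str.len row0
    let height : Int := PySem.List.len grid
    let period : Nat := Nat.lcm row0.toList.length grid.length
    let all_cells := iscAllCells width height start goal
    -- for y, row in enumerate(grid): for x, cell in enumerate(row): if …: winds.append(…)
    let winds : List ((Int × Int) × (Int × Int)) :=
      (PySem.List.enumerate grid).foldl (fun ws yr =>
        (PySem.List.enumerate yr.2.toList).foldl (fun ws xc =>
          if iscIsArrow xc.2 then ws ++ [((xc.1, yr.1), iscDir xc.2)] else ws) ws) []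
    iscLoopA width height all_cells winds [] period

-- ===== PORT B =====

def identify_safe_cells_alt (grid : List String) (start : Int × Int) (goal : Int × Int) : List (List (Int × Int)) :=
  match grid with
  | [] => []  -- Python raises IndexError on grid[0]; excluded by Pre_
  | row0 :: _ =>
    let width : Int := PySem.Str.len row0
    let height : Int := PySem.List.len grid
    let period : Nat := Nat.lcm row0.toList.length grid.length
    let all_cells := iscAllCells width height start goal
    -- [((x, y), directions[c]) for y, row in enumerate(grid) for x, c in enumerate(row) if c in '<>^v']
    let winds : List ((Int × Int) × (Int × Int)) :=
      (PySem.List.enumerate grid).flatMap (fun yr =>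
        (((PySem.List.enumerate yr.2.toList).filter (fun xc => iscIsArrow xc.2)).map
          (fun xc => ((xc.1, yr.1), iscDir xc.2))))
    -- [all_cells - {((x + dx*i) % width, (y + dy*i) % height) for …} for i in range(period)]
    (PySem.List.pyRange 0 (period : Int) 1).map (fun i =>
      PySem.Set.diff all_cells (PySem.Set.ofList (winds.map (fun w =>
        (PySem.Int.mod (w.1.1 + w.2.1 * i) width, PySem.Int.mod (w.1.2 + w.2.2 * i) height)))))

-- ===== PRECONDITION & SPEC =====
-- Pre_ excludes the empty grid, on which A raises IndexError, and ragged grids carrying a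
-- blizzard arrow at a column index ≥ len(grid[0]), where A's unreduced step-0 position is an
-- accident of its implementation and both behaviours are defensible.
def Pre_identify_safe_cells (grid : List String) (start : Int × Int) (goal : Int × Int) : Prop :=
  grid ≠ [] ∧ ∀ s ∈ grid, ∀ p ∈ PySem.List.enumerate s.toList,
    iscIsArrow p.2 = true → p.1 < PySem.Str.len grid.headI
instance (grid : List String) (start : Int × Int) (goal : Int × Int) : Decidable (Pre_identify_safe_cells grid start goal) := by unfold Pre_identify_safe_cells; infer_instance

def pvWitness_identify_safe_cells : List String × (Int × Int) × (Int × Int) :=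
  ([">.", ".v"], (0, 0), (1, 1))

def Spec_identify_safe_cells (grid : List String) (start : Int × Int) (goal : Int × Int) (out : List (List (Int × Int))) : Prop := out = identify_safe_cells_alt grid start goal
instance (grid : List String) (start : Int × Int) (goal : Int × Int) (out : List (List (Int × Int))) : Decidable (Spec_identify_safe_cells grid start goal out) := by unfold Spec_identify_safe_cells; infer_instance

-- ===== CLAIM (what is proved, stated in full; the proofs are below) =====
def Claim_equal_identify_safe_cells : Prop := ∀ (grid : List String) (start : Int × Int) (goal : Int × Int), Dom_identify_safe_cells grid start goal → Pre_identify_safe_cells grid start goal → Spec_identify_safe_cells grid start goal (identify_safe_cells grid start goal)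

-- ===== LEMMAS AND PROOFS =====

theorem pvWitness_ok :
    Dom_identify_safe_cells pvWitness_identify_safe_cells.1 pvWitness_identify_safe_cells.2.1 pvWitness_identify_safe_cells.2.2 ∧
    Pre_identify_safe_cells pvWitness_identify_safe_cells.1 pvWitness_identify_safe_cells.2.1 pvWitness_identify_safe_cells.2.2 := by
  decide

-- the blizzard position after j update steps, in closed form
def iscShift (width height : Int) (j : Int) (w : (Int × Int) × (Int × Int)) : (Int × Int) × (Int × Int) :=
  ((PySem.Int.mod (w.1.1 + w.2.1 * j) width, PySem.Int.mod (w.1.2 + w.2.2 * j) height), w.2)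

-- A's two accumulating extraction loops equal B's comprehension
theorem isc_winds_eq (grid : List String) :
    (PySem.List.enumerate grid).foldl (fun ws yr =>
        (PySem.List.enumerate yr.2.toList).foldl (fun ws xc =>
          if iscIsArrow xc.2 then ws ++ [((xc.1, yr.1), iscDir xc.2)] else ws) ws) []
    = (PySem.List.enumerate grid).flatMap (fun yr =>
        (((PySem.List.enumerate yr.2.toList).filter (fun xc => iscIsArrow xc.2)).map
          (fun xc => ((xc.1, yr.1), iscDir xc.2)))) := by
  have h : ∀ yr : Int × String, ∀ ws : List ((Int × Int) × (Int × Int)),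
      (PySem.List.enumerate yr.2.toList).foldl (fun ws xc =>
        if iscIsArrow xc.2 then ws ++ [((xc.1, yr.1), iscDir xc.2)] else ws) ws
      = ws ++ (((PySem.List.enumerate yr.2.toList).filter (fun xc => iscIsArrow xc.2)).map
          (fun xc => ((xc.1, yr.1), iscDir xc.2))) := by
    intro yr ws
    exact PySem.List.foldl_append_if _ _ _ ws
  calc (PySem.List.enumerate grid).foldl _ []
      = (PySem.List.enumerate grid).foldl (fun ws yr => ws ++
          (((PySem.List.enumerate yr.2.toList).filter (fun xc => iscIsArrow xc.2)).map
            (fun xc => ((xc.1, yr.1), iscDir xc.2)))) [] := by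
        apply List.foldl_ext
        intro ws yr _
        exact h yr ws
    _ = _ := PySem.List.foldl_append_eq_flatMap _ _ []

-- advancing the closed-form position one step
theorem iscStep_shift (width height : Int) (j : Int) (w : (Int × Int) × (Int × Int))
    (hb : 0 ≤ w.1.1 ∧ w.1.1 < width ∧ 0 ≤ w.1.2 ∧ w.1.2 < height) :
    iscStep width height (iscShift width height j w) = iscShift width height (j + 1) w := by
  obtain ⟨h1, h2, h3, h4⟩ := hb
  have hw : (0:Int) < width := by omega
  have hh : (0:Int) < height := by omega
  simp only [iscStep, iscShift, PySem.Int.mod_eq_emod_of_pos hw, PySem.Int.mod_eq_emod_of_pos hh,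
    Prod.mk.injEq]
  have e1 : w.1.1 + w.2.1 * j + w.2.1 = w.1.1 + w.2.1 * (j + 1) := by ring
  have e2 : w.1.2 + w.2.2 * j + w.2.2 = w.1.2 + w.2.2 * (j + 1) := by ring
  exact ⟨⟨by rw [Int.emod_add_emod, e1], by rw [Int.emod_add_emod, e2]⟩, trivial⟩

theorem iscShift_zero (width height : Int) (w : (Int × Int) × (Int × Int))
    (hb : 0 ≤ w.1.1 ∧ w.1.1 < width ∧ 0 ≤ w.1.2 ∧ w.1.2 < height) :
    iscShift width height 0 w = w := by
  obtain ⟨h1, h2, h3, h4⟩ := hb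
  have hw : (0:Int) < width := by omega
  have hh : (0:Int) < height := by omega
  simp only [iscShift, mul_zero, add_zero,
    PySem.Int.mod_eq_emod_of_pos hw, PySem.Int.mod_eq_emod_of_pos hh]
  rw [Int.emod_eq_of_lt h1 h2, Int.emod_eq_of_lt h3 h4]

-- main loop invariant: A's loop on the shifted winds produces the closed-form sets
theorem iscLoopA_eq (width height : Int) (all : PySem.Set (Int × Int))
    (winds0 : List ((Int × Int) × (Int × Int)))
    (hb : ∀ w ∈ winds0, 0 ≤ w.1.1 ∧ w.1.1 < width ∧ 0 ≤ w.1.2 ∧ w.1.2 < height) :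
    ∀ (n : Nat) (j : Int) (safe : List (List (Int × Int))),
      iscLoopA width height all (winds0.map (iscShift width height j)) safe n
      = safe ++ (List.range n).map (fun (k : Nat) =>
          PySem.Set.diff all (PySem.Set.ofList (winds0.map (fun w =>
            (PySem.Int.mod (w.1.1 + w.2.1 * (j + (k : Int))) width,
             PySem.Int.mod (w.1.2 + w.2.2 * (j + (k : Int))) height))))) := by
  intro n
  induction n with
  | zero => intro j safe; simp [iscLoopA]
  | succ n ih =>
    intro j safe
    have hmapstep : (winds0.map (iscShift width height j)).map (iscStep width height)
        = winds0.map (iscShift width height (j + 1)) := by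
      rw [List.map_map]
      apply List.map_congr_left
      intro w hw
      exact iscStep_shift width height j w (hb w hw)
    have hfst : (winds0.map (iscShift width height j)).map (·.1)
        = winds0.map (fun w =>
            (PySem.Int.mod (w.1.1 + w.2.1 * j) width,
             PySem.Int.mod (w.1.2 + w.2.2 * j) height)) := by
      rw [List.map_map]; rfl
    simp only [iscLoopA, hmapstep, hfst]
    rw [ih (j + 1)]
    rw [List.range_succ_eq_map, List.map_cons, List.map_map]
    simp only [List.append_assoc, List.singleton_append, Int.natCast_zero, add_zero]
    congr 2
    apply List.map_congr_left
    intro k _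
    simp only [Function.comp]
    congr 2
    apply List.map_congr_left
    intro w _
    have e1 : w.1.1 + w.2.1 * (j + 1 + (k : Int)) = w.1.1 + w.2.1 * (j + ((k : Int) + 1)) := by ring
    have e2 : w.1.2 + w.2.2 * (j + 1 + (k : Int)) = w.1.2 + w.2.2 * (j + ((k : Int) + 1)) := by ring
    rw [e1, e2]
    push_cast
    ring_nf

-- bounds for the extracted winds, from Pre_
theorem isc_winds_bounds (row0 : String) (rest : List String)
    (hpre : ∀ s ∈ row0 :: rest, ∀ p ∈ PySem.List.enumerate s.toList,
      iscIsArrow p.2 = true → p.1 < PySem.Str.len (row0 :: rest).headI) :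
    ∀ w ∈ (PySem.List.enumerate (row0 :: rest)).flatMap (fun yr =>
        (((PySem.List.enumerate yr.2.toList).filter (fun xc => iscIsArrow xc.2)).map
          (fun xc => ((xc.1, yr.1), iscDir xc.2)))),
      0 ≤ w.1.1 ∧ w.1.1 < PySem.Str.len row0 ∧ 0 ≤ w.1.2 ∧ w.1.2 < PySem.List.len (row0 :: rest) := by
  intro w hw
  rw [List.mem_flatMap] at hw
  obtain ⟨yr, hyr, hw⟩ := hw
  rw [List.mem_map] at hw
  obtain ⟨xc, hxc, rfl⟩ := hw
  rw [List.mem_filter] at hxc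
  obtain ⟨hxc, harrow⟩ := hxc
  rw [PySem.List.mem_enumerate_iff] at hyr hxc
  obtain ⟨ky, hky, rfl⟩ := hyr
  obtain ⟨kx, hkx, rfl⟩ := hxc
  have hx := hpre _ (List.mem_of_getElem rfl) _ (by
    rw [PySem.List.mem_enumerate_iff]; exact ⟨kx, hkx, rfl⟩) harrow
  simp only [List.headI] at hx
  refine ⟨by positivity, ?_, by positivity, ?_⟩
  · simpa using hx
  · simp only [PySem.List.len_eq, zero_add]
    exact_mod_cast hky

-- ===== VERDICT (by name: the statement is the Claim_ definition above) =====
theorem identify_safe_cells_spec : Claim_equal_identify_safe_cells := by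
  intro grid start goal _hdom hpre
  unfold Spec_identify_safe_cells
  obtain ⟨hne, hpre⟩ := hpre
  match grid with
  | [] => exact absurd rfl hne
  | row0 :: rest =>
    unfold identify_safe_cells identify_safe_cells_alt
    simp only
    rw [isc_winds_eq]
    set winds := (PySem.List.enumerate (row0 :: rest)).flatMap (fun yr =>
        (((PySem.List.enumerate yr.2.toList).filter (fun xc => iscIsArrow xc.2)).map
          (fun xc => ((xc.1, yr.1), iscDir xc.2)))) with hwinds
    have hb := isc_winds_bounds row0 rest hpre
    rw [← hwinds] at hb
    have h0 : winds.map (iscShift (PySem.Str.len row0) (PySem.List.len (row0 :: rest)) 0) = winds := by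
      conv_rhs => rw [← List.map_id winds]
      apply List.map_congr_left
      intro w hw
      exact iscShift_zero _ _ w (hb w hw)
    rw [← h0, iscLoopA_eq _ _ _ _ hb, PySem.List.pyRange_one, List.map_map, List.nil_append]
    simp only [Int.sub_zero, Int.toNat_natCast]
    apply List.map_congr_left
    intro k _
    simp only [Function.comp_apply, zero_add]
    rw [h0]
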